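-- pv_equiv track=rewrite | github.com/iphonexsmax25/CSCI203-A2 | Tree.py | max_queue_length
-- ===== SOURCE A (Python) =====
-- from collections import Counter
-- from typing import List, Tuple
--
-- def max_queue_length(arrival_times: List[int], start_times: List[int]) -> int:
--     """
--     Queue length = arrivals - service_starts (waiting only, not in service).
--     At the same timestamp we apply both together (no fake spikes).
--     """
--     A = Counter(arrival_times)
--     S = Counter(start_times)
--     times = sorted(set(A) | set(S))
--
--     q = 0
--     max_q = 0
--     for t in times:
--         q += A.get(t, 0)
--         q -= S.get(t, 0)
--         if q > max_q:
--             max_q = q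
--     return max_q
-- ===== SOURCE B (Python) =====
-- def _le_count(xs_sorted, t):
--     """Number of elements <= t in an ascending list, by binary search."""
--     lo, hi = 0, len(xs_sorted)
--     while lo < hi:
--         mid = (lo + hi) // 2
--         if xs_sorted[mid] <= t:
--             lo = mid + 1
--         else:
--             hi = mid
--     return lo
--
-- def max_queue_length(arrival_times, start_times):
--     """Stateless counting characterization: the queue length just after
--     timestamp t equals (#arrivals <= t) - (#starts <= t), and a new maximum
--     can only be set at an arrival time.  Sort both lists once; at the last
--     position k of each run of equal arrival times, #arrivals <= arr[k] is
--     simply k + 1, so only #starts <= arr[k] needs a binary search."""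
--     arr = sorted(arrival_times)
--     st = sorted(start_times)
--     n = len(arr)
--     max_q = 0
--     for k in range(n):
--         if k + 1 < n and arr[k + 1] == arr[k]:
--             continue
--         q = (k + 1) - _le_count(st, arr[k])
--         if q > max_q:
--             max_q = q
--     return max_q
-- ===== Notes on version B (the rewrite author's own statement) =====
-- stated objective: alternative
-- what changed: Replaces A's Counter dictionaries and stateful sweep over the sorted union of timestamps (running queue, per-timestamp deltas, running max) by a stateless counting characterization: sort each list once, then at the last index k of every run of equal arrival times evaluate the queue level directly as (k+1) - (#starts <= arr[k]) with one hand-rolled binary search, and take the maximum with 0; correctness rests on the level after t being (#arrivals <= t) - (#starts <= t) and a new maximum only occurring at an arrival time.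
import Mathlib
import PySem

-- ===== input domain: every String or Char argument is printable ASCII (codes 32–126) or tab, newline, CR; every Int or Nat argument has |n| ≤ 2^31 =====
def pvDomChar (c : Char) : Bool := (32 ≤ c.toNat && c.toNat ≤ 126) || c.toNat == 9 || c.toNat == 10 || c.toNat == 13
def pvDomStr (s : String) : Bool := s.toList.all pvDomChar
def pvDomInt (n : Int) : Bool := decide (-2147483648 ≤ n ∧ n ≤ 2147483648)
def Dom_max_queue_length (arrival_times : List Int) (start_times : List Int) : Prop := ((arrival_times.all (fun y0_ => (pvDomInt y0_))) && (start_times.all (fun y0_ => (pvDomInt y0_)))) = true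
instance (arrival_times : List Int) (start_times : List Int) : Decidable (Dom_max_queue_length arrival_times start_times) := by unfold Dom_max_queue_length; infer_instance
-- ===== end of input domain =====

-- B drops A's Counter dictionaries and stateful sweep entirely: it evaluates
-- the closed characterization q(t) = #{arrivals <= t} - #{starts <= t} at each
-- arrival time by binary search over the two sorted lists and takes the
-- maximum with 0 (no event sweep, no running queue).

-- ===== PORT A =====
-- literal port of A: two Counters, sorted union of their key sets, delta scan
def max_queue_length (arrival_times : List Int) (start_times : List Int) : Int :=
  let A := PySem.Dict.counter arrival_times
  let S := PySem.Dict.counter start_times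
  let times := PySem.List.sorted
    (PySem.Set.union (PySem.Set.ofList A.keys) (PySem.Set.ofList S.keys)) (fun x => x) false
  let p := times.foldl (fun (p : Int × Int) t =>
      let q := p.1 + A.getD t 0 - S.getD t 0
      (q, if q > p.2 then q else p.2)) (0, 0)
  p.2

-- ===== PORT B =====
-- literal port of Source B's _le_count: binary-search loop; on every call
-- lo < hi ≤ xs.length, so the index mid is in range and getD is exact
-- (Python's (lo+hi)//2 on nonnegative ints is Nat division); the structural
-- fuel argument only bounds the iteration count (hi - lo <= fuel always
-- holds, so the guard never fires)
def pvLeCountLoop (xs : List Int) (t : Int) (fuel lo hi : Nat) : Nat :=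
  match fuel with
  | 0 => lo
  | fuel + 1 =>
    if lo < hi then
      let mid := (lo + hi) / 2
      if xs.getD mid 0 ≤ t then pvLeCountLoop xs t fuel (mid + 1) hi
      else pvLeCountLoop xs t fuel lo mid
    else lo

def pvLeCount (xs : List Int) (t : Int) : Nat := pvLeCountLoop xs t xs.length 0 xs.length

-- literal port of Source B's max_queue_length: sort both lists once; for each k
-- in range(n), skip unless k is the last index of a run of equal arrival
-- times, there evaluate q = (k+1) - (#starts <= arr[k]) by binary search and
-- keep the running maximum (starting at 0); range(n) is List.range n with
-- Nat indices, all in range, so getD is exact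
def max_queue_length_alt (arrival_times : List Int) (start_times : List Int) : Int :=
  let arr := PySem.List.sorted arrival_times (fun x => x) false
  let st := PySem.List.sorted start_times (fun x => x) false
  let n := arr.length
  (List.range n).foldl (fun max_q k =>
    if k + 1 < n ∧ arr.getD (k + 1) 0 = arr.getD k 0 then max_q
    else
      let q := ((k : Int) + 1) - (pvLeCount st (arr.getD k 0) : Int)
      if q > max_q then q else max_q) 0

-- ===== PRECONDITION & SPEC =====
def Spec_max_queue_length (arrival_times : List Int) (start_times : List Int) (out : Int) : Prop := out = max_queue_length_alt arrival_times start_times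
instance (arrival_times : List Int) (start_times : List Int) (out : Int) : Decidable (Spec_max_queue_length arrival_times start_times out) := by unfold Spec_max_queue_length; infer_instance

-- ===== CLAIM (what is proved, stated in full; the proofs are below) =====
def Claim_equal_max_queue_length : Prop := ∀ (arrival_times : List Int) (start_times : List Int), Dom_max_queue_length arrival_times start_times → Spec_max_queue_length arrival_times start_times (max_queue_length arrival_times start_times)

-- ===== LEMMAS AND PROOFS =====

-- the "queue level" after timestamp u: arrivals <= u minus starts <= u
def pvLevel (arr st : List Int) (u : Int) : Int :=
  ((arr.filter (fun x => x ≤ u)).length : Int) - ((st.filter (fun x => x ≤ u)).length : Int)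

-- A's loop, abstracted over the time list, with counts in place of dict lookups
def pvStep (arr st : List Int) (p : Int × Int) (t : Int) : Int × Int :=
  let q := p.1 + (arr.count t : Int) - (st.count t : Int)
  (q, if q > p.2 then q else p.2)

def pvFold (arr st times : List Int) (p : Int × Int) : Int × Int :=
  times.foldl (pvStep arr st) p

def pvTimes (arr st : List Int) : List Int :=
  PySem.List.sorted (PySem.Set.ofList (arr ++ st)) (fun x => x) false

lemma nodup_pvTimes (X Y : List Int) : (pvTimes X Y).Nodup := by
  unfold pvTimes
  exact ((PySem.List.sorted_perm (PySem.Set.ofList (X ++ Y)) (fun x => x) false).symm.nodup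
    (PySem.Set.nodup_ofList _))

lemma mem_pvTimes (X Y : List Int) (x : Int) : x ∈ pvTimes X Y ↔ x ∈ X ∨ x ∈ Y := by
  unfold pvTimes
  rw [PySem.List.mem_sorted, PySem.Set.mem_ofList, List.mem_append]

lemma pairwise_pvTimes (X Y : List Int) : (pvTimes X Y).Pairwise (· < ·) := by
  unfold pvTimes
  exact PySem.List.sorted_ofList_pairwise_lt _

-- A's scan equals the abstract fold over the sorted distinct timestamps
lemma a_eq_canonical (arr st : List Int) :
    max_queue_length arr st = (pvFold arr st (pvTimes arr st) (0, 0)).2 := by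
  have htimes : PySem.List.sorted
      (PySem.Set.union (PySem.Set.ofList (PySem.Dict.counter arr).keys)
        (PySem.Set.ofList (PySem.Dict.counter st).keys)) (fun x => x) false
      = pvTimes arr st := by
    unfold pvTimes
    apply PySem.List.sorted_eq_sorted_of_perm _ _ _ (fun a b hab => hab)
    apply (List.perm_ext_iff_of_nodup ?_ (PySem.Set.nodup_ofList _)).2
    · intro x
      simp [PySem.Set.mem_union, PySem.Set.mem_ofList, PySem.Dict.keys_counter,
        List.mem_append]
    · apply PySem.Set.nodup_union
      exact PySem.Set.nodup_ofList _
  simp only [max_queue_length, pvFold]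
  rw [htimes]
  congr 1
  congr 1
  funext p t
  simp [pvStep, PySem.Dict.getD_counter]

-- sum over a list of the indicator [v = x] is the count of x
lemma sum_indicator_eq_count (l : List Int) (x : Int) :
    (l.map (fun v => if v = x then (1 : Int) else 0)).sum = (l.count x : Int) := by
  induction l with
  | nil => simp
  | cons a l ih =>
    by_cases h : a = x
    · subst h; simp only [List.map_cons, List.sum_cons, ih,
        List.count_cons_self]; push_cast; ring
    · simp [h, ih]

-- summing per-timestamp counts over the distinct timestamps <= u gives the
-- number of elements <= u
lemma sum_count_filter (xs ts : List Int) (hnd : ts.Nodup)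
    (hsub : ∀ x ∈ xs, x ∈ ts) (u : Int) :
    ((ts.filter (fun v => v ≤ u)).map (fun v => (xs.count v : Int))).sum
      = ((xs.filter (fun x => x ≤ u)).length : Int) := by
  induction xs with
  | nil => simp
  | cons x xs ih =>
    have hsub' : ∀ y ∈ xs, y ∈ ts := fun y hy => hsub y (List.mem_cons_of_mem _ hy)
    have hx : x ∈ ts := hsub x List.mem_cons_self
    have hsplit : ((ts.filter (fun v => v ≤ u)).map (fun v => ((x :: xs).count v : Int))).sum
        = ((ts.filter (fun v => v ≤ u)).map (fun v => (xs.count v : Int))).sum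
          + ((ts.filter (fun v => v ≤ u)).map (fun v => if v = x then (1 : Int) else 0)).sum := by
      rw [← List.sum_map_add]
      apply congrArg
      apply List.map_congr_left
      intro v _
      by_cases h : v = x
      · subst h; simp
      · simp [List.count_cons, h]
        exact Ne.symm h
    rw [hsplit, ih hsub', sum_indicator_eq_count]
    have hcf : (ts.filter (fun v => v ≤ u)).count x
        = if x ≤ u then ts.count x else 0 := by
      by_cases h : x ≤ u
      · rw [if_pos h, List.count_filter (by simpa using h)]
      · rw [if_neg h, List.count_eq_zero]
        intro hm
        exact h (by simpa using (List.mem_filter.1 hm).2)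
    have hct : ts.count x = 1 := (List.count_eq_one_of_mem hnd hx)
    by_cases hxu : x ≤ u
    · rw [hcf, if_pos hxu, hct]
      simp [hxu]
    · rw [hcf, if_neg hxu]
      simp [hxu]

-- the loop invariant: if the pending deltas reconstruct pvLevel at every
-- remaining timestamp, A's fold computes the running max of pvLevel
lemma fold_eq_max_levels (arr st : List Int) :
    ∀ (ts : List Int), ts.Pairwise (· < ·) →
    ∀ (q0 m0 : Int),
    (∀ u ∈ ts, q0 + ((ts.filter (fun v => v ≤ u)).map
        (fun v => (arr.count v : Int) - (st.count v : Int))).sum = pvLevel arr st u) →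
    (pvFold arr st ts (q0, m0)).2 = (ts.map (pvLevel arr st)).foldl max m0 := by
  intro ts
  induction ts with
  | nil => intro _ q0 m0 _; rfl
  | cons t ts ih =>
    intro hp q0 m0 hH
    have hlt : ∀ v ∈ ts, t < v := (List.pairwise_cons.1 hp).1
    have hfilt_t : (t :: ts).filter (fun v => v ≤ t) = [t] := by
      simp only [List.filter_cons, decide_eq_true_eq, le_refl, if_pos]
      rw [List.filter_eq_nil_iff.2]
      intro v hv
      simp only [decide_eq_true_eq]
      exact not_le.2 (hlt v hv)
    have hq1 : q0 + ((arr.count t : Int) - (st.count t : Int)) = pvLevel arr st t := by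
      have := hH t List.mem_cons_self
      rw [hfilt_t] at this
      simpa using this
    have hH' : ∀ u ∈ ts, (q0 + ((arr.count t : Int) - (st.count t : Int)))
        + ((ts.filter (fun v => v ≤ u)).map
            (fun v => (arr.count v : Int) - (st.count v : Int))).sum = pvLevel arr st u := by
      intro u hu
      have := hH u (List.mem_cons_of_mem _ hu)
      have htle : t ≤ u := le_of_lt (hlt u hu)
      rw [show (t :: ts).filter (fun v => v ≤ u) = t :: ts.filter (fun v => v ≤ u) by
        simp [htle]] at this
      simp only [List.map_cons, List.sum_cons] at this
      linarith
    unfold pvFold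
    simp only [List.foldl_cons]
    have hstep : pvStep arr st (q0, m0) t
        = (q0 + (arr.count t : Int) - (st.count t : Int),
           max m0 (pvLevel arr st t)) := by
      unfold pvStep
      have : q0 + (arr.count t : Int) - (st.count t : Int) = pvLevel arr st t := by linarith
      rw [this]
      simp [max_def]
      omega
    rw [hstep]
    have := ih (List.pairwise_cons.1 hp).2
      (q0 + (arr.count t : Int) - (st.count t : Int)) (max m0 (pvLevel arr st t))
      (by intro u hu; have := hH' u hu; linarith)
    unfold pvFold at this
    rw [this]
    simp

-- fold-max facts
lemma le_foldl_max_init (l : List Int) (a : Int) : a ≤ l.foldl max a := by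
  induction l generalizing a with
  | nil => simp
  | cons x l ih => exact le_trans (le_max_left a x) (ih (max a x))

lemma le_foldl_max_of_mem (l : List Int) (a x : Int) (hx : x ∈ l) : x ≤ l.foldl max a := by
  induction l generalizing a with
  | nil => simp at hx
  | cons y l ih =>
    rcases List.mem_cons.1 hx with rfl | h
    · exact le_trans (le_max_right a x) (le_foldl_max_init l (max a x))
    · exact ih (max a y) h

lemma foldl_max_le (l : List Int) (a b : Int) (ha : a ≤ b) (hl : ∀ x ∈ l, x ≤ b) :
    l.foldl max a ≤ b := by
  induction l generalizing a with
  | nil => simpa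
  | cons x l ih =>
    exact ih (max a x) (max_le ha (hl x List.mem_cons_self))
      (fun y hy => hl y (List.mem_cons_of_mem _ hy))

-- key fact: the level at ANY timestamp is bounded by the best level at an
-- arrival time (or 0): between arrivals the level can only have decreased
lemma level_le_arrivals_max (arr st : List Int) (u : Int) :
    pvLevel arr st u ≤ (arr.map (pvLevel arr st)).foldl max 0 := by
  by_cases hemp : arr.filter (fun x => x ≤ u) = []
  · have h0 : ((arr.filter (fun x => x ≤ u)).length : Int) = 0 := by rw [hemp]; rfl
    have : pvLevel arr st u ≤ 0 := by
      unfold pvLevel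
      rw [h0]
      have : (0 : Int) ≤ ((st.filter (fun x => x ≤ u)).length : Int) := by positivity
      linarith
    exact le_trans this (le_foldl_max_init _ 0)
  · obtain ⟨a, ha⟩ := Option.isSome_iff_exists.1
      (List.isSome_max?_of_ne_nil (l := arr.filter (fun x => x ≤ u)) hemp)
    have hmem : a ∈ arr.filter (fun x => x ≤ u) := List.max?_mem ha
    have hmax : ∀ x ∈ arr.filter (fun x => x ≤ u), x ≤ a :=
      fun x hx => (List.max?_le_iff ha).1 le_rfl x hx
    have haarr : a ∈ arr := (List.mem_filter.1 hmem).1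
    have hau : a ≤ u := by
      have := (List.mem_filter.1 hmem).2; simpa using this
    -- arrivals <= u are exactly arrivals <= a
    have harr_eq : arr.filter (fun x => x ≤ u) = arr.filter (fun x => x ≤ a) := by
      apply List.filter_congr
      intro x hx
      simp only [decide_eq_decide]
      constructor
      · intro hxu
        exact hmax x (List.mem_filter.2 ⟨hx, by simpa using hxu⟩)
      · intro hxa
        exact le_trans hxa hau
    have hst : (st.filter (fun x => x ≤ a)).length ≤ (st.filter (fun x => x ≤ u)).length := by
      have hss : st.filter (fun x => x ≤ a) = (st.filter (fun x => x ≤ u)).filter (fun x => x ≤ a) := by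
        rw [List.filter_filter]
        apply List.filter_congr
        intro x hx
        by_cases hxa : x ≤ a
        · simp [hxa, le_trans hxa hau]
        · simp [hxa]
      rw [hss]
      exact List.Sublist.length_le List.filter_sublist
    have hle : pvLevel arr st u ≤ pvLevel arr st a := by
      unfold pvLevel
      rw [harr_eq]
      omega
    exact le_trans hle (le_foldl_max_of_mem _ 0 _ (List.mem_map.2 ⟨a, haarr, rfl⟩))

-- the max over the distinct timestamps equals B's max over arrival times
lemma max_times_eq_max_arr (arr st : List Int) :
    ((pvTimes arr st).map (pvLevel arr st)).foldl max 0
      = (arr.map (pvLevel arr st)).foldl max 0 := by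
  apply le_antisymm
  · apply foldl_max_le
    · exact le_foldl_max_init _ 0
    · intro x hx
      obtain ⟨u, hu, rfl⟩ := List.mem_map.1 hx
      exact level_le_arrivals_max arr st u
  · apply foldl_max_le
    · exact le_foldl_max_init _ 0
    · intro x hx
      obtain ⟨a, ha, rfl⟩ := List.mem_map.1 hx
      exact le_foldl_max_of_mem _ 0 _
        (List.mem_map.2 ⟨a, (mem_pvTimes arr st a).2 (Or.inl ha), rfl⟩)

-- the binary-search loop lands exactly on the boundary between the elements
-- <= t and the elements > t of the sorted list
lemma pvLeCountLoop_spec (xs : List Int) (t : Int) (hs : xs.Pairwise (· ≤ ·)) :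
    ∀ (fuel lo hi : Nat), hi - lo ≤ fuel → lo ≤ hi → hi ≤ xs.length →
    (∀ j (hj : j < xs.length), j < lo → xs[j] ≤ t) →
    (∀ j (hj : j < xs.length), hi ≤ j → t < xs[j]) →
    pvLeCountLoop xs t fuel lo hi ≤ xs.length ∧
      (∀ j (hj : j < xs.length),
        (j < pvLeCountLoop xs t fuel lo hi → xs[j] ≤ t) ∧
        (pvLeCountLoop xs t fuel lo hi ≤ j → t < xs[j])) := by
  have hmono : ∀ (i j : Nat) (hi : i < xs.length) (hj : j < xs.length),
      i ≤ j → xs[i] ≤ xs[j] := by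
    intro i j hi hj hij
    rcases Nat.lt_or_ge i j with h | h
    · exact (List.pairwise_iff_getElem.1 hs) i j hi hj h
    · have : i = j := le_antisymm hij h
      subst this; exact le_refl _
  intro fuel
  induction fuel with
  | zero =>
    intro lo hi hfuel hlh hhl hlow hhigh
    have : lo = hi := by omega
    subst this
    simp only [pvLeCountLoop]
    exact ⟨by omega, fun j hj => ⟨fun h => hlow j hj h, fun h => hhigh j hj h⟩⟩
  | succ fuel ih =>
    intro lo hi hfuel hlh hhl hlow hhigh
    show (if lo < hi then _ else lo) ≤ xs.length ∧ _
    by_cases h : lo < hi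
    · simp only [pvLeCountLoop, h, if_true]
      have hmid : (lo + hi) / 2 < xs.length := by omega
      have hmidlo : lo ≤ (lo + hi) / 2 := by omega
      have hmidhi : (lo + hi) / 2 < hi := by omega
      rw [List.getD_eq_getElem xs 0 hmid]
      by_cases hle : xs[(lo + hi) / 2] ≤ t
      · simp only [hle, if_true]
        apply ih ((lo + hi) / 2 + 1) hi (by omega) (by omega) hhl
        · intro j hj hjlt
          rcases Nat.lt_or_ge j lo with hcase | hcase
          · exact hlow j hj hcase
          · exact le_trans (hmono j ((lo + hi) / 2) hj hmid (by omega)) hle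
        · exact hhigh
      · simp only [hle, if_false]
        apply ih lo ((lo + hi) / 2) (by omega) (by omega) (by omega) hlow
        intro j hj hjge
        exact lt_of_lt_of_le (lt_of_not_ge hle) (hmono ((lo + hi) / 2) j hmid hj hjge)
    · simp only [pvLeCountLoop, h, if_false]
      have : lo = hi := by omega
      subst this
      exact ⟨by omega, fun j hj => ⟨fun hjl => hlow j hj hjl, fun hjg => hhigh j hj hjg⟩⟩

-- a boundary index r (everything below <= t, everything at or above > t)
-- is the number of elements <= t
lemma boundary_filter_length (xs : List Int) (t : Int) (r : Nat) (hle : r ≤ xs.length)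
    (hlow : ∀ j (hj : j < xs.length), j < r → xs[j] ≤ t)
    (hhigh : ∀ j (hj : j < xs.length), r ≤ j → t < xs[j]) :
    (xs.filter (fun x => x ≤ t)).length = r := by
  have htake : (xs.take r).filter (fun x => x ≤ t) = xs.take r := by
    rw [List.filter_eq_self]
    intro a ha
    obtain ⟨i, hi, hget⟩ := List.mem_iff_getElem.1 ha
    simp only [List.length_take, lt_min_iff] at hi
    have hil : i < xs.length := hi.2
    have : a = xs[i] := by rw [← hget, List.getElem_take]
    subst this
    simp only [decide_eq_true_eq]
    exact hlow i hil hi.1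
  have hdrop : (xs.drop r).filter (fun x => x ≤ t) = [] := by
    rw [List.filter_eq_nil_iff]
    intro a ha
    obtain ⟨i, hi, hget⟩ := List.mem_iff_getElem.1 ha
    simp only [List.length_drop] at hi
    have hil : r + i < xs.length := by omega
    have : a = xs[r + i] := by rw [← hget, List.getElem_drop]
    subst this
    simp only [decide_eq_true_eq]
    exact not_le.2 (hhigh (r + i) hil (by omega))
  conv_lhs => rw [← List.take_append_drop r xs]
  rw [List.filter_append, htake, hdrop, List.append_nil, List.length_take]
  omega

-- on a sorted list the loop's result is the number of elements <= t
lemma pvLeCount_eq_filter_length (xs : List Int) (t : Int) (hs : xs.Pairwise (· ≤ ·)) :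
    pvLeCount xs t = (xs.filter (fun x => x ≤ t)).length := by
  obtain ⟨hle, hchar⟩ := pvLeCountLoop_spec xs t hs xs.length 0 xs.length
    (by omega) (by omega) le_rfl (fun j hj h => by omega) (fun j hj h => by omega)
  exact (boundary_filter_length xs t _ hle (fun j hj h => (hchar j hj).1 h)
    (fun j hj h => (hchar j hj).2 h)).symm

-- in a sorted list, elements are monotone in the index
lemma sorted_getElem_mono (xs : List Int) (hs : xs.Pairwise (· ≤ ·))
    (i j : Nat) (hi : i < xs.length) (hj : j < xs.length) (hij : i ≤ j) :
    xs[i] ≤ xs[j] := by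
  rcases Nat.lt_or_ge i j with h | h
  · exact (List.pairwise_iff_getElem.1 hs) i j hi hj h
  · have : i = j := le_antisymm hij h
    subst this; exact le_refl _

-- the number of elements <= t in ANY list equals the number in its sort
lemma filter_length_sorted (xs : List Int) (t : Int) :
    ((PySem.List.sorted xs (fun x => x) false).filter (fun x => x ≤ t)).length
      = (xs.filter (fun x => x ≤ t)).length := by
  rw [← List.countP_eq_length_filter, ← List.countP_eq_length_filter]
  exact (PySem.List.sorted_perm xs (fun x => x) false).countP_eq _

-- every index in a sorted list has a run end above it carrying the same value
lemma exists_run_end (xs : List Int) :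
    ∀ (d k0 : Nat) (h0 : k0 < xs.length), xs.length - k0 ≤ d →
    ∃ k, ∃ hk : k < xs.length, k0 ≤ k ∧ xs[k] = xs[k0] ∧
      (¬ (k + 1 < xs.length) ∨ ∀ hk1 : k + 1 < xs.length, xs[k + 1] ≠ xs[k]) := by
  intro d
  induction d with
  | zero => intro k0 h0 hd; omega
  | succ d ih =>
    intro k0 h0 hd
    by_cases h1 : k0 + 1 < xs.length
    · by_cases heq : xs[k0 + 1] = xs[k0]
      · obtain ⟨k, hk, hk0, hval, hend⟩ := ih (k0 + 1) h1 (by omega)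
        exact ⟨k, hk, by omega, by rw [hval, heq], hend⟩
      · exact ⟨k0, h0, le_rfl, rfl, Or.inr (fun _ => heq)⟩
    · exact ⟨k0, h0, le_rfl, rfl, Or.inl h1⟩

-- the skip-fold over range(n) is the fold-max of g over the kept indices
lemma foldl_skip_eq_fmax (c : Nat → Prop) [DecidablePred c] (g : Nat → Int) :
    ∀ (l : List Nat) (m0 : Int),
    l.foldl (fun m k => if c k then m else (if g k > m then g k else m)) m0
      = ((l.filter (fun k => ¬ c k)).map g).foldl max m0 := by
  intro l
  induction l with
  | nil => intro m0; rfl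
  | cons k l ih =>
    intro m0
    by_cases h : c k
    · simp only [List.foldl_cons, List.filter_cons, h, if_pos, not_true, decide_false]
      simp [ih]
    · simp only [List.foldl_cons, List.filter_cons]
      simp only [h, not_false_iff, decide_true, if_false, if_true, List.map_cons,
        List.foldl_cons]
      rw [ih]
      congr 1
      simp [max_def]
      omega

-- the level evaluated by B at a run end k is exactly pvLevel at arr[k]
lemma level_at_run_end (arr st : List Int)
    (S : List Int) (hS : S = PySem.List.sorted arr (fun x => x) false)
    (T : List Int) (hT : T = PySem.List.sorted st (fun x => x) false)
    (k : Nat) (hk : k < S.length)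
    (hend : ¬ (k + 1 < S.length) ∨ ∀ hk1 : k + 1 < S.length, S[k + 1] ≠ S[k]) :
    ((k : Int) + 1) - (pvLeCount T (S[k]) : Int) = pvLevel arr st (S[k]) := by
  have hps : S.Pairwise (· ≤ ·) := by rw [hS]; exact PySem.List.sorted_pairwise arr (fun x => x)
  have hpt : T.Pairwise (· ≤ ·) := by rw [hT]; exact PySem.List.sorted_pairwise st (fun x => x)
  have hcntS : (arr.filter (fun x => x ≤ S[k])).length = k + 1 := by
    rw [← filter_length_sorted arr (S[k]), ← hS]
    apply boundary_filter_length S (S[k]) (k + 1) (by omega)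
    · intro j hj hjk
      exact sorted_getElem_mono S hps j k hj hk (by omega)
    · intro j hj hjk
      have hk1 : k + 1 < S.length := by omega
      have hne : S[k + 1] ≠ S[k] := by
        rcases hend with h | h
        · exact absurd hk1 h
        · exact h hk1
      have hlt : S[k] < S[k + 1] :=
        lt_of_le_of_ne (sorted_getElem_mono S hps k (k + 1) hk hk1 (by omega)) (Ne.symm hne)
      exact lt_of_lt_of_le hlt (sorted_getElem_mono S hps (k + 1) j hk1 hj hjk)
  have hcntT : pvLeCount T (S[k]) = (st.filter (fun x => x ≤ S[k])).length := by
    rw [pvLeCount_eq_filter_length T _ hpt, hT, filter_length_sorted]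
  unfold pvLevel
  rw [hcntT, hcntS]
  push_cast
  ring

-- B's loop is the fold-max of the levels over the arrival times
lemma b_eq_max_levels (arr st : List Int) :
    max_queue_length_alt arr st = (arr.map (pvLevel arr st)).foldl max 0 := by
  simp only [max_queue_length_alt]
  set S := PySem.List.sorted arr (fun x => x) false with hS
  set T := PySem.List.sorted st (fun x => x) false with hT
  have hps : S.Pairwise (· ≤ ·) := PySem.List.sorted_pairwise arr (fun x => x)
  rw [foldl_skip_eq_fmax
    (fun k => k + 1 < S.length ∧ S.getD (k + 1) 0 = S.getD k 0)
    (fun k => ((k : Int) + 1) - (pvLeCount T (S.getD k 0) : Int))]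
  apply le_antisymm
  · apply foldl_max_le
    · exact le_foldl_max_init _ 0
    · intro x hx
      obtain ⟨k, hkmem, rfl⟩ := List.mem_map.1 hx
      have hk : k < S.length := List.mem_range.1 (List.mem_filter.1 hkmem).1
      have hcond := of_decide_eq_true (List.mem_filter.1 hkmem).2
      have hend : ¬ (k + 1 < S.length) ∨ ∀ hk1 : k + 1 < S.length, S[k + 1] ≠ S[k] := by
        by_cases h1 : k + 1 < S.length
        · refine Or.inr (fun hk1 h => hcond ⟨h1, ?_⟩)
          rw [List.getD_eq_getElem S 0 hk1, List.getD_eq_getElem S 0 hk, h]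
        · exact Or.inl h1
      rw [List.getD_eq_getElem S 0 hk,
        level_at_run_end arr st S hS T hT k hk hend]
      have : S[k] ∈ arr := (PySem.List.sorted_perm arr (fun x => x) false).mem_iff.1
        (hS ▸ List.getElem_mem hk)
      exact le_foldl_max_of_mem _ 0 _ (List.mem_map.2 ⟨S[k], this, rfl⟩)
  · apply foldl_max_le
    · exact le_foldl_max_init _ 0
    · intro x hx
      obtain ⟨a, ha, rfl⟩ := List.mem_map.1 hx
      have haS : a ∈ S := (PySem.List.sorted_perm arr (fun x => x) false).mem_iff.2 ha
      obtain ⟨k0, hk0, hget⟩ := List.mem_iff_getElem.1 haS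
      obtain ⟨k, hk, hk0k, hval, hend⟩ := exists_run_end S S.length k0 hk0 (by omega)
      have hval' : S[k] = a := by rw [hval, hget]
      have hlev : pvLevel arr st a
          = ((k : Int) + 1) - (pvLeCount T (S[k]) : Int) := by
        rw [level_at_run_end arr st S hS T hT k hk hend, hval']
      rw [hlev]
      apply le_foldl_max_of_mem _ 0
      apply List.mem_map.2
      refine ⟨k, ?_, ?_⟩
      · apply List.mem_filter.2
        refine ⟨List.mem_range.2 hk, ?_⟩
        simp only [decide_eq_true_eq]
        rintro ⟨h1, h2⟩
        rw [List.getD_eq_getElem S 0 h1, List.getD_eq_getElem S 0 hk] at h2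
        rcases hend with h | h
        · exact h h1
        · exact h h1 h2
      · rw [List.getD_eq_getElem S 0 hk]

-- ===== VERDICT (by name: the statement is the Claim_ definition above) =====
theorem max_queue_length_spec : Claim_equal_max_queue_length := by
  intro arr st _
  unfold Spec_max_queue_length
  rw [a_eq_canonical, b_eq_max_levels, ← max_times_eq_max_arr]
  apply fold_eq_max_levels arr st _ (pairwise_pvTimes arr st)
  intro u _
  have h1 := sum_count_filter arr (pvTimes arr st) (nodup_pvTimes arr st)
    (fun x hx => (mem_pvTimes arr st x).2 (Or.inl hx)) u
  have h2 := sum_count_filter st (pvTimes arr st) (nodup_pvTimes arr st)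
    (fun x hx => (mem_pvTimes arr st x).2 (Or.inr hx)) u
  have hsplit : (((pvTimes arr st).filter (fun v => v ≤ u)).map
      (fun v => (arr.count v : Int) - (st.count v : Int))).sum
      = (((pvTimes arr st).filter (fun v => v ≤ u)).map (fun v => (arr.count v : Int))).sum
        - (((pvTimes arr st).filter (fun v => v ≤ u)).map (fun v => (st.count v : Int))).sum := by
    induction ((pvTimes arr st).filter (fun v => v ≤ u)) with
    | nil => simp
    | cons a l ih => simp only [List.map_cons, List.sum_cons, ih]; ring
  rw [hsplit, h1, h2]
  unfold pvLevel
  ring
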